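-- pv_equiv track=rewrite | github.com/kcw2297/coding_test | 프로그래머스/lvl3/greedy_스타수열.py | solution
-- ===== SOURCE A (Python) =====
-- from collections import Counter
--
-- def solution(a):
--     counter = Counter(a)
--
--     max_length = 0
--
--     for key in counter:
--
--         # TODO: 최적화 조건 => key 기준으로, 부분 수열 최대 길이보다 적을 시 넘김
--         if counter[key] * 2 <= max_length:
--             continue
--
--         # TODO: key로 만들 수 있는 쌍 개수
--         pair_count = 0
--         i = 0
--
--
--         while i < len(a) - 1:
--             if (a[i] != a[i+1]) and (key == a[i] or key == a[i+1]):
--                 pair_count += 1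
--                 i += 2
--             else:
--                 i += 1
--
--         max_length = max(max_length, pair_count * 2)
--
--     return max_length
-- ===== SOURCE B (Python) =====
-- def solution(a):
--     n = len(a)
--     occ = {}
--     for i, v in enumerate(a):
--         occ.setdefault(v, []).append(i)
--     best = 0
--     for key, ps in occ.items():
--         cnt = 0
--         i = 0
--         for p in ps:
--             if i < p:
--                 cnt += 1
--                 i = p + 1
--             elif p + 1 < n and a[p + 1] != key:
--                 cnt += 1
--                 i = p + 2
--             else:
--                 i = p + 1
--         best = max(best, 2 * cnt)
--     return best
-- ===== Notes on version B (the rewrite author's own statement) =====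
-- stated objective: faster
-- what changed: B replaces A's per-distinct-value rescan of the whole array by one pass that groups the occurrence indices of each value in a dict, then simulates the greedy pairing for each value by jumping directly between that value's occurrences, so total work is proportional to n instead of n times the number of scanned values.
import Mathlib
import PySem

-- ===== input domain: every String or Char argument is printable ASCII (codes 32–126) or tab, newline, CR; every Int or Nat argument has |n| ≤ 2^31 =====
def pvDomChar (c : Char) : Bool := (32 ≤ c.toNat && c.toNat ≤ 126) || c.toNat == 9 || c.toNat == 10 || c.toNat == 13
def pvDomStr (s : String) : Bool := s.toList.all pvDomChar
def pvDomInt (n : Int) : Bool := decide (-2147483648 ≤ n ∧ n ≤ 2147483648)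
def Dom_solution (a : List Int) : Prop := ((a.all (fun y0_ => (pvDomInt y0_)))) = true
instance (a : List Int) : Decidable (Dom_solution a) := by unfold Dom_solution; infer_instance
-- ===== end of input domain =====

-- B groups each value's occurrence indices in one pass and replays the greedy pairing by jumping
-- between occurrences, instead of A's full rescan of the array for each distinct value (objective: faster).

-- ===== PORT A =====
-- A's inner `while i < len(a) - 1` loop, with `pair_count` as the accumulator pc.
def pvWhileA (a : List Int) (key : Int) (pc : Int) (i : Nat) : Int :=
  if i < a.length - 1 then
    if a.getD i 0 ≠ a.getD (i + 1) 0 ∧ (key = a.getD i 0 ∨ key = a.getD (i + 1) 0) then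
      pvWhileA a key (pc + 1) (i + 2)
    else
      pvWhileA a key pc (i + 1)
  else pc
termination_by a.length - i
decreasing_by all_goals omega

def solution (a : List Int) : Int :=
  let counter : PySem.Dict Int Int := PySem.Dict.counter a
  counter.keys.foldl
    (fun max_length key =>
      if counter.getD key 0 * 2 ≤ max_length then max_length
      else max max_length (pvWhileA a key 0 0 * 2))
    0

-- ===== PORT B =====
-- B's inner `for p in ps` loop body; state s = (cnt, i).
def pvStepB (a : List Int) (key : Int) (s : Int × Int) (p : Int) : Int × Int :=
  if s.2 < p then (s.1 + 1, p + 1)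
  else if p + 1 < (a.length : Int) ∧ PySem.List.pyGetD a (p + 1) 0 ≠ key then (s.1 + 1, p + 2)
  else (s.1, p + 1)

def solution_alt (a : List Int) : Int :=
  let occ : PySem.Dict Int (List Int) :=
    (PySem.List.enumerate a).foldl
      (fun d p => d.modify p.2 [] (fun l => l ++ [p.1])) PySem.Dict.empty
  occ.items.foldl
    (fun best kp => max best (2 * (kp.2.foldl (pvStepB a kp.1) (0, 0)).1))
    0

-- ===== PRECONDITION & SPEC =====
def Spec_solution (a : List Int) (out : Int) : Prop := out = solution_alt a
instance (a : List Int) (out : Int) : Decidable (Spec_solution a out) := by unfold Spec_solution; infer_instance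

-- ===== CLAIM (what is proved, stated in full; the proofs are below) =====
def Claim_equal_solution : Prop := ∀ (a : List Int), Dom_solution a → Spec_solution a (solution a)

-- ===== LEMMAS AND PROOFS =====

-- Pure (accumulator-free) version of A's inner while loop, for the proofs.
def pvPairs (a : List Int) (key : Int) (i : Nat) : Int :=
  if i < a.length - 1 then
    if a.getD i 0 ≠ a.getD (i + 1) 0 ∧ (key = a.getD i 0 ∨ key = a.getD (i + 1) 0) then
      1 + pvPairs a key (i + 2)
    else
      pvPairs a key (i + 1)
  else 0
termination_by a.length - i
decreasing_by all_goals omega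

lemma pvWhileA_eq (a : List Int) (key pc : Int) (i : Nat) :
    pvWhileA a key pc i = pc + pvPairs a key i := by
  fun_induction pvWhileA a key pc i with
  | case1 pc i h hc ih => rw [pvPairs, if_pos h, if_pos hc]; omega
  | case2 pc i h hc ih => rw [pvPairs, if_pos h, if_neg hc]; omega
  | case3 pc i h => rw [pvPairs, if_neg h]; omega

lemma pvPairs_nil (a : List Int) (key : Int) (i : Nat)
    (h : ∀ k : Nat, i ≤ k → k < a.length → a.getD k 0 ≠ key) :
    pvPairs a key i = 0 := by
  fun_induction pvPairs a key i with
  | case1 i hg hc ih =>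
    exfalso
    rcases hc.2 with h1 | h1
    · exact h i (le_refl _) (by omega) h1.symm
    · exact h (i+1) (by omega) (by omega) h1.symm
  | case2 i hg hc ih => exact ih (fun k hk hk2 => h k (by omega) hk2)
  | case3 i hg => rfl

lemma pvPairs_jump_aux (a : List Int) (key : Int) :
    ∀ (d i k : Nat), k - i = d + 1 → i < k → k < a.length → a.getD k 0 = key →
      (∀ j : Nat, i ≤ j → j < k → a.getD j 0 ≠ key) →
      pvPairs a key i = 1 + pvPairs a key (k + 1) := by
  intro d
  induction d with
  | zero =>
    intro i k hd hik hk ha hgap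
    have hk1 : k = i + 1 := by omega
    subst hk1
    rw [pvPairs, if_pos (by omega), if_pos ?_]
    · constructor
      · intro heq; exact hgap i (le_refl _) (by omega) (heq.trans ha)
      · exact Or.inr ha.symm
  | succ d ih =>
    intro i k hd hik hk ha hgap
    rw [pvPairs, if_pos (by omega), if_neg ?_]
    · exact ih (i+1) k (by omega) (by omega) hk ha (fun j hj hj2 => hgap j (by omega) hj2)
    · rintro ⟨-, h1 | h1⟩
      · exact hgap i (le_refl _) (by omega) h1.symm
      · exact hgap (i+1) (by omega) (by omega) h1.symm

lemma pvPairs_jump (a : List Int) (key : Int) (i k : Nat)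
    (hik : i < k) (hk : k < a.length) (ha : a.getD k 0 = key)
    (hgap : ∀ j : Nat, i ≤ j → j < k → a.getD j 0 ≠ key) :
    pvPairs a key i = 1 + pvPairs a key (k + 1) :=
  pvPairs_jump_aux a key (k - i - 1) i k (by omega) hik hk ha hgap

lemma pvPairs_le_count (a : List Int) (key : Int) (i : Nat) :
    pvPairs a key i ≤ ((a.drop i).count key : Int) := by
  fun_induction pvPairs a key i with
  | case1 i hg hc ih =>
    have hi : i < a.length := by omega
    have hi1 : i + 1 < a.length := by omega
    have hd1 : List.drop i a = a[i] :: List.drop (i+1) a := (List.getElem_cons_drop hi).symm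
    have hd2 : List.drop (i+1) a = a[i+1] :: List.drop (i+2) a := (List.getElem_cons_drop hi1).symm
    have hg1 : a.getD i 0 = a[i] := List.getD_eq_getElem a 0 hi
    have hg2 : a.getD (i+1) 0 = a[i+1] := List.getD_eq_getElem a 0 hi1
    rw [hd1, hd2]
    simp only [List.count_cons]
    push_cast
    rcases hc.2 with h1 | h1
    · rw [hg1] at h1
      have hb : (a[i] == key) = true := by simp [h1]
      simp only [hb, if_true]
      split_ifs <;> omega
    · rw [hg2] at h1
      have hb : (a[i+1] == key) = true := by simp [h1]
      simp only [hb, if_true]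
      split_ifs <;> omega
  | case2 i hg hc ih =>
    have hi : i < a.length := by omega
    have hd1 : List.drop i a = a[i] :: List.drop (i+1) a := (List.getElem_cons_drop hi).symm
    rw [hd1]
    simp only [List.count_cons]
    push_cast
    split_ifs <;> omega
  | case3 i hg => simp

lemma pvScan_spec (a : List Int) (key : Int) :
    ∀ (ps : List Int) (i : Nat) (c : Int),
      ps.Pairwise (· < ·) →
      (∀ p ∈ ps, ∃ k : Nat, p = (k : Int) ∧ k < a.length ∧ a.getD k 0 = key) →
      (∀ k : Nat, i ≤ k → k < a.length → a.getD k 0 = key → (k : Int) ∈ ps) →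
      (∀ p ∈ ps, (i : Int) ≤ p) →
      (ps.foldl (pvStepB a key) (c, (i : Int))).1 = c + pvPairs a key i := by
  intro ps
  induction ps with
  | nil =>
    intro i c _ _ hcov _
    simp only [List.foldl_nil]
    rw [pvPairs_nil a key i]
    · omega
    · intro k hk1 hk2 hk3
      exact absurd (hcov k hk1 hk2 hk3) (List.not_mem_nil)
  | cons p ps ih =>
    intro i c hpw hocc hcov hlb
    obtain ⟨k, rfl, hk, ha⟩ := hocc _ (List.mem_cons_self ..)
    have hik : i ≤ k := by exact_mod_cast hlb _ (List.mem_cons_self ..)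
    have hgap : ∀ j : Nat, i ≤ j → j < k → a.getD j 0 ≠ key := by
      intro j hj1 hj2 hj3
      rcases List.mem_cons.mp (hcov j hj1 (by omega) hj3) with h | h
      · have : j = k := by exact_mod_cast h
        omega
      · have h' := List.rel_of_pairwise_cons hpw h
        have : k < j := by exact_mod_cast h'
        omega
    have hocc' : ∀ p ∈ ps, ∃ k : Nat, p = (k : Int) ∧ k < a.length ∧ a.getD k 0 = key :=
      fun p hp => hocc p (List.mem_cons_of_mem _ hp)
    have hpw' := hpw.of_cons
    have hgt : ∀ q ∈ ps, (k : Int) < q := fun q hq => List.rel_of_pairwise_cons hpw hq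
    rcases Nat.lt_or_ge i k with hik' | hik'
    · -- i < k : pair at (k-1, k)
      simp only [List.foldl_cons, pvStepB, if_pos (by push_cast; omega : ((c, (i:Int)).2 < (k:Int)))]
      have hcast : ((k : Int) + 1) = ((k + 1 : Nat) : Int) := by push_cast; ring
      rw [hcast, ih (k+1) (c+1) hpw' hocc' ?cov ?lb]
      · rw [pvPairs_jump a key i k hik' hk ha hgap]; ring
      case cov =>
        intro k' h1 h2 h3
        rcases List.mem_cons.mp (hcov k' (by omega) h2 h3) with h | h
        · exfalso; have : k' = k := by exact_mod_cast h
          omega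
        · exact h
      case lb =>
        intro q hq
        have := hgt q hq
        push_cast
        omega
    · -- i = k
      have hik2 : i = k := by omega
      subst hik2
      by_cases h2 : (i : Int) + 1 < (a.length : Int) ∧ PySem.List.pyGetD a ((i : Int) + 1) 0 ≠ key
      · -- pair at (i, i+1)
        have hlen : i + 1 < a.length := by exact_mod_cast h2.1
        have hget : PySem.List.pyGetD a ((i : Int) + 1) 0 = a.getD (i+1) 0 := by
          rw [(by push_cast; ring : ((i : Int) + 1) = ((i + 1 : Nat) : Int)), PySem.List.pyGetD_natCast]
        have hne : a.getD (i+1) 0 ≠ key := by rw [← hget]; exact h2.2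
        simp only [List.foldl_cons, pvStepB, if_neg (by simp : ¬((c, (i:Int)).2 < (i:Int))), if_pos h2]
        have hcast : ((i : Int) + 2) = ((i + 2 : Nat) : Int) := by push_cast; ring
        rw [hcast, ih (i+2) (c+1) hpw' hocc' ?cov2 ?lb2]
        · have : pvPairs a key i = 1 + pvPairs a key (i + 2) := by
            rw [pvPairs, if_pos (by omega), if_pos ?_]
            refine ⟨?_, Or.inl ha.symm⟩
            rw [ha]; exact fun h => hne h.symm
          rw [this]; ring
        case cov2 =>
          intro k' h1' h2' h3'
          rcases List.mem_cons.mp (hcov k' (by omega) h2' h3') with h | h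
          · exfalso; have : k' = i := by exact_mod_cast h
            omega
          · exact h
        case lb2 =>
          intro q hq
          obtain ⟨k', rfl, hk', ha'⟩ := hocc' q hq
          have := hgt _ hq
          have hki : i < k' := by exact_mod_cast this
          have : k' ≠ i + 1 := fun h => hne (h ▸ ha')
          push_cast
          omega
      · -- no pair at i
        simp only [List.foldl_cons, pvStepB, if_neg (by simp : ¬((c, (i:Int)).2 < (i:Int))), if_neg h2]
        have hcast : ((i : Int) + 1) = ((i + 1 : Nat) : Int) := by push_cast; ring
        rw [hcast, ih (i+1) c hpw' hocc' ?cov3 ?lb3]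
        · have : pvPairs a key i = pvPairs a key (i + 1) := by
            rcases Nat.lt_or_ge (i+1) a.length with hl | hl
            · have hget : PySem.List.pyGetD a ((i : Int) + 1) 0 = a.getD (i+1) 0 := by
                rw [(by push_cast; ring : ((i : Int) + 1) = ((i + 1 : Nat) : Int)), PySem.List.pyGetD_natCast]
              have heq : a.getD (i+1) 0 = key := by
                by_contra hne
                exact h2 ⟨by exact_mod_cast hl, by rw [hget]; exact hne⟩
              rw [pvPairs, if_pos (by omega), if_neg ?_]
              rintro ⟨hne', -⟩
              exact hne' (ha.trans heq.symm)
            · rw [pvPairs, if_neg (by omega), pvPairs, if_neg (by omega)]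
          rw [this]
        case cov3 =>
          intro k' h1' h2' h3'
          rcases List.mem_cons.mp (hcov k' (by omega) h2' h3') with h | h
          · exfalso; have : k' = i := by exact_mod_cast h
            omega
          · exact h
        case lb3 =>
          intro q hq
          have := hgt q hq
          push_cast at this ⊢
          omega

-- The occurrence-index list of `key` in `a`, as B's dict stores it.
def pvPs (a : List Int) (key : Int) : List Int :=
  ((PySem.List.enumerate a).filter (fun p => p.2 == key)).map (fun p => p.1)

def pvOccDict (a : List Int) : PySem.Dict Int (List Int) :=
  (PySem.List.enumerate a).foldl
    (fun d p => d.modify p.2 [] (fun l => l ++ [p.1])) PySem.Dict.empty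

lemma pvOccDict_getD (a : List Int) (key : Int) :
    (pvOccDict a).getD key [] = pvPs a key := by
  have h1 : pvOccDict a =
      ((PySem.List.enumerate a).map Prod.swap).foldl
        (fun d q => d.modify q.1 [] (fun l => l ++ [q.2])) PySem.Dict.empty := by
    rw [List.foldl_map]; simp [pvOccDict]
  rw [h1, PySem.Dict.getD_foldl_modify_append]
  simp [pvPs, List.filter_map, List.map_map, Function.comp_def]

lemma pvPs_pairwise (a : List Int) (key : Int) : (pvPs a key).Pairwise (· < ·) := by
  unfold pvPs
  rw [List.pairwise_map]
  exact (PySem.List.pairwise_lt_enumerate a 0).filter _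

lemma pvPs_mem (a : List Int) (key : Int) (q : Int) :
    q ∈ pvPs a key ↔ ∃ k : Nat, q = (k : Int) ∧ k < a.length ∧ a.getD k 0 = key := by
  unfold pvPs
  constructor
  · intro hq
    obtain ⟨p, hp, rfl⟩ := List.mem_map.mp hq
    obtain ⟨hpm, hpk⟩ := List.mem_filter.mp hp
    obtain ⟨k, hk, rfl⟩ := (PySem.List.mem_enumerate_iff ..).mp hpm
    refine ⟨k, by simp, hk, ?_⟩
    rw [List.getD_eq_getElem a 0 hk]
    simpa using hpk
  · rintro ⟨k, rfl, hk, ha⟩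
    refine List.mem_map.mpr ⟨((k : Int), a[k]), List.mem_filter.mpr ⟨?_, ?_⟩, rfl⟩
    · exact (PySem.List.mem_enumerate_iff ..).mpr ⟨k, hk, by simp⟩
    · rw [List.getD_eq_getElem a 0 hk] at ha
      simpa using ha

lemma solution_eq_alt (a : List Int) : solution a = solution_alt a := by
  have hnodup : (pvOccDict a).keys.Nodup :=
    PySem.Dict.nodup_keys_foldl_modify_key _ _ _ _ _ PySem.Dict.nodup_keys_empty
  have hkeys : (pvOccDict a).keys = PySem.Set.ofList a := by
    unfold pvOccDict
    rw [PySem.Dict.keys_foldl_modify_key]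
    simp [PySem.List.map_snd_enumerate, PySem.Set.ofList_eq_foldl, PySem.Set.update,
      PySem.Dict.keys_empty]
  have hitems : (pvOccDict a).items =
      (PySem.Set.ofList a).map (fun k => (k, (pvOccDict a).getD k [])) := by
    rw [PySem.Dict.items_eq_map_keys _ hnodup [], hkeys]
  show _ = (pvOccDict a).items.foldl _ _
  rw [hitems, List.foldl_map]
  show (PySem.Dict.counter a).keys.foldl _ _ = _
  rw [PySem.Dict.keys_counter]
  apply PySem.List.foldl_congr_mem
  intro acc key _
  have hscan : (((pvOccDict a).getD key []).foldl (pvStepB a key) (0, 0)).1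
      = pvPairs a key 0 := by
    rw [pvOccDict_getD]
    have := pvScan_spec a key (pvPs a key) 0 0 (pvPs_pairwise a key)
      (fun p hp => (pvPs_mem a key p).mp hp)
      (fun k _ hk ha => (pvPs_mem a key (k : Int)).mpr ⟨k, rfl, hk, ha⟩)
      (fun p hp => by obtain ⟨k, rfl, -, -⟩ := (pvPs_mem a key p).mp hp; positivity)
    simpa using this
  have hw : pvWhileA a key 0 0 = pvPairs a key 0 := by
    rw [pvWhileA_eq]; ring
  have hle : pvPairs a key 0 ≤ (a.count key : Int) := by
    simpa using pvPairs_le_count a key 0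
  rw [PySem.Dict.getD_counter, hscan, hw]
  split_ifs with h
  · have : 2 * pvPairs a key 0 ≤ acc := by omega
    omega
  · ring_nf

-- ===== VERDICT (by name: the statement is the Claim_ definition above) =====
theorem solution_spec : Claim_equal_solution := by
  intro a _
  show solution a = solution_alt a
  exact solution_eq_alt a
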